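-- pv_equiv track=rewrite | github.com/mickej/advent-of-code | 2018/03.py | find_missing_overlap
-- ===== SOURCE A (Python) =====
-- def find_missing_overlap(overlapids):
--     not_overlapping = {}
--     for id, overlaps in overlapids:
--         if not overlaps:
--             not_overlapping[id] = id
--         else:
--             if id in not_overlapping:
--                 not_overlapping.pop(id, None)
--
--             for o in overlaps:
--                 not_overlapping.pop(o, None)
--
--     return not_overlapping
-- ===== SOURCE B (Python) =====
-- def find_missing_overlap(overlapids):
--     events = list(overlapids)
--     # Pass 1: for every id, the index of the last event that removes it.
--     last_removed = {}
--     for i, (id, overlaps) in enumerate(events):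
--         if overlaps:
--             last_removed[id] = i
--             for o in overlaps:
--                 last_removed[o] = i
--     # Pass 2: an id survives iff some empty-overlaps event for it comes after
--     # its last removal; its dict position is the first such event.
--     result = {}
--     for i, (id, overlaps) in enumerate(events):
--         if not overlaps and last_removed.get(id, -1) < i and id not in result:
--             result[id] = id
--     return result
-- ===== Notes on version B (the rewrite author's own statement) =====
-- stated objective: alternative
-- what changed: Replaces A's single pass of incremental dict pops with two passes: first precompute each id's last removal index, then build the result by inserting an id at its first empty-overlaps event that follows its last removal (no pop operations).
import Mathlib
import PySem

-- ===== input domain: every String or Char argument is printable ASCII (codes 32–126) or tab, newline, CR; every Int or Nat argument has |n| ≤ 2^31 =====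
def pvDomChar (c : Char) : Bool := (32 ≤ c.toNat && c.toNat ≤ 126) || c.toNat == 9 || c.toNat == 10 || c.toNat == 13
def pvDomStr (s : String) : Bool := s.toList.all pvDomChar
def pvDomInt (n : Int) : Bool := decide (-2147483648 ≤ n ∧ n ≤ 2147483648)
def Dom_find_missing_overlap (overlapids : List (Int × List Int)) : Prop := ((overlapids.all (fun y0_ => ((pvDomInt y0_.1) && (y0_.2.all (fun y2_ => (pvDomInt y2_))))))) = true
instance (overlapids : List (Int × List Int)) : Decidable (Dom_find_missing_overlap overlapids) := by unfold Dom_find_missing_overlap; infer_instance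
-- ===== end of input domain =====

-- B replaces A's single pass of incremental dict pops with two passes (precompute each
-- id's last removal index, then insert survivors at their first qualifying event);
-- same asymptotic cost, alternative decomposition.

-- ===== PORT A =====
-- loop body of A's single for-loop (pop(k, None) on a missing key is a no-op; ported as Dict.erase behind the 'if id in' check A makes)
def pvA_step (d : PySem.Dict Int Int) (p : Int × List Int) : PySem.Dict Int Int :=
  if p.2 = [] then d.insert p.1 p.1
  else
    let d1 := if d.contains p.1 then d.erase p.1 else d
    p.2.foldl (fun d o => d.erase o) d1

def find_missing_overlap (overlapids : List (Int × List Int)) : List (Int × Int) :=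
  (overlapids.foldl pvA_step PySem.Dict.empty).items

-- ===== PORT B =====
-- 'for i, (id, ov) in enumerate(events)' is ported as a fold whose state carries the running index.
def pvIFold (g : Int → PySem.Dict Int Int → (Int × List Int) → PySem.Dict Int Int)
    (st : Int × PySem.Dict Int Int) (l : List (Int × List Int)) : Int × PySem.Dict Int Int :=
  l.foldl (fun st p => (st.1 + 1, g st.1 st.2 p)) st

-- pass 1 body: record i as the last removal index of id and of every o in overlaps
def pvB_pass1 (i : Int) (d : PySem.Dict Int Int) (p : Int × List Int) : PySem.Dict Int Int :=
  if p.2 = [] then d else p.2.foldl (fun d o => d.insert o i) (d.insert p.1 i)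

-- pass 2 body: insert id at its first empty-overlaps event after its last removal
def pvB_pass2 (lr : PySem.Dict Int Int) (i : Int) (d : PySem.Dict Int Int) (p : Int × List Int) : PySem.Dict Int Int :=
  if p.2 = [] ∧ lr.getD p.1 (-1) < i ∧ ¬ d.contains p.1 then d.insert p.1 p.1 else d

def find_missing_overlap_alt (overlapids : List (Int × List Int)) : List (Int × Int) :=
  let lr := (pvIFold pvB_pass1 (0, PySem.Dict.empty) overlapids).2
  ((pvIFold (pvB_pass2 lr) (0, PySem.Dict.empty) overlapids).2).items

-- ===== PRECONDITION & SPEC =====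
def Spec_find_missing_overlap (overlapids : List (Int × List Int)) (out : List (Int × Int)) : Prop := out = find_missing_overlap_alt overlapids
instance (overlapids : List (Int × List Int)) (out : List (Int × Int)) : Decidable (Spec_find_missing_overlap overlapids out) := by unfold Spec_find_missing_overlap; infer_instance

-- ===== CLAIM (what is proved, stated in full; the proofs are below) =====
def Claim_equal_find_missing_overlap : Prop := ∀ (overlapids : List (Int × List Int)), Dom_find_missing_overlap overlapids → Spec_find_missing_overlap overlapids (find_missing_overlap overlapids)

-- ===== LEMMAS AND PROOFS =====

theorem pvIFold_append (g : Int → PySem.Dict Int Int → (Int × List Int) → PySem.Dict Int Int)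
    (st : Int × PySem.Dict Int Int) (l1 l2 : List (Int × List Int)) :
    pvIFold g st (l1 ++ l2) = pvIFold g (pvIFold g st l1) l2 := by
  simp [pvIFold, List.foldl_append]

theorem pvIFold_singleton (g : Int → PySem.Dict Int Int → (Int × List Int) → PySem.Dict Int Int)
    (st : Int × PySem.Dict Int Int) (p : Int × List Int) :
    pvIFold g st [p] = (st.1 + 1, g st.1 st.2 p) := rfl

theorem pvIFold_fst (g : Int → PySem.Dict Int Int → (Int × List Int) → PySem.Dict Int Int)
    (st : Int × PySem.Dict Int Int) (l : List (Int × List Int)) :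
    (pvIFold g st l).1 = st.1 + (l.length : Int) := by
  induction l generalizing st with
  | nil => simp [pvIFold]
  | cons p t ih =>
      simp only [pvIFold, List.foldl_cons] at *
      rw [ih]
      push_cast [List.length_cons]
      ring

-- getD after pass 1's inner loop of inserts with the constant value i
theorem pv_getD_foldl_insert_const (ov : List Int) (d : PySem.Dict Int Int) (i k : Int) :
    (ov.foldl (fun d o => d.insert o i) d).getD k (-1)
      = if k ∈ ov then i else d.getD k (-1) := by
  induction ov generalizing d with
  | nil => simp
  | cons h t ih =>
      simp only [List.foldl_cons, ih, PySem.Dict.getD_insert, List.mem_cons]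
      by_cases hkt : k ∈ t <;> by_cases hkh : k = h <;> simp [hkt, hkh]

-- every recorded last-removal index is below the running counter
theorem pvR_lt (l : List (Int × List Int)) (st : Int × PySem.Dict Int Int)
    (h : ∀ k, st.2.getD k (-1) < st.1) (k : Int) :
    ((pvIFold pvB_pass1 st l).2).getD k (-1) < st.1 + (l.length : Int) := by
  induction l generalizing st with
  | nil => simpa [pvIFold] using h k
  | cons p t ih =>
      have step : ∀ k, (pvB_pass1 st.1 st.2 p).getD k (-1) < st.1 + 1 := by
        intro k
        unfold pvB_pass1
        split
        · exact lt_trans (h k) (by omega)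
        · rw [pv_getD_foldl_insert_const]
          split
          · omega
          · rw [PySem.Dict.getD_insert]
            split
            · omega
            · exact lt_trans (h k) (by omega)
      have := ih (st.1 + 1, pvB_pass1 st.1 st.2 p) step
      simp only [pvIFold, List.foldl_cons] at *
      calc _ < st.1 + 1 + (t.length : Int) := this
        _ = st.1 + ((p :: t).length : Int) := by push_cast [List.length_cons]; ring

-- the erase chain of A's non-empty branch is one filter over the items
theorem pv_eraseFold_items (ov : List Int) (d : PySem.Dict Int Int) :
    (ov.foldl (fun d o => d.erase o) d).items
      = d.items.filter (fun q => !decide (q.1 ∈ ov)) := by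
  induction ov generalizing d with
  | nil => simp
  | cons h t ih =>
      simp only [List.foldl_cons]
      rw [ih]
      have he : (d.erase h).items = d.items.filter (fun q => !(q.1 == h)) := rfl
      rw [he, List.filter_filter]
      apply List.filter_congr
      intro q _
      by_cases h1 : q.1 = h <;> by_cases h2 : q.1 ∈ t <;> simp [h1, h2]

theorem pvA_step_items_ne (d : PySem.Dict Int Int) (p : Int × List Int) (hp : p.2 ≠ []) :
    (pvA_step d p).items = d.items.filter (fun q => !decide (q.1 ∈ p.1 :: p.2)) := by
  unfold pvA_step
  rw [if_neg hp]
  have h1 : (if d.contains p.1 then d.erase p.1 else d).items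
      = d.items.filter (fun q => !(q.1 == p.1)) := by
    split
    · rfl
    · next hc =>
      symm
      rw [List.filter_eq_self]
      intro q hq
      have hc0 : d.contains p.1 = false := by simpa using hc
      have hc' : d.items.any (fun q => q.1 == p.1) = false := hc0
      have := List.any_eq_false.mp hc' q hq
      simpa using this
  rw [pv_eraseFold_items]
  conv_lhs => rw [h1]
  rw [List.filter_filter]
  apply List.filter_congr
  intro q _
  by_cases h1 : q.1 = p.1 <;> by_cases h2 : q.1 ∈ p.2 <;> simp [h1, h2]

-- in A's dict every value equals its key
theorem pvA_vals (l : List (Int × List Int)) (d : PySem.Dict Int Int)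
    (hv : ∀ q ∈ d.items, q.2 = q.1) :
    ∀ q ∈ (l.foldl pvA_step d).items, q.2 = q.1 := by
  induction l generalizing d with
  | nil => simp only [List.foldl_nil]; exact hv
  | cons p t ih =>
      simp only [List.foldl_cons]
      apply ih
      intro q hq
      by_cases hp : p.2 = []
      · unfold pvA_step at hq
        rw [if_pos hp] at hq
        rcases (PySem.Dict.mem_items_insert _ _ _ _).mp hq with h | ⟨h, _⟩
        · rw [h]
        · exact hv q h
      · rw [pvA_step_items_ne d p hp] at hq
        exact hv q (List.mem_of_mem_filter hq)

-- inserting (k, k) into a key-valued dict that already contains k changes nothing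
theorem pv_insert_self_of_contains (d : PySem.Dict Int Int) (k : Int)
    (hc : d.contains k = true) (hv : ∀ q ∈ d.items, q.2 = q.1) :
    d.insert k k = d := by
  apply PySem.Dict.ext
  rw [PySem.Dict.items_insert_of_contains _ _ hc]
  have : List.map (fun p => if (p.1 == k) = true then (k, k) else p) d.items
      = List.map id d.items := by
    apply List.map_congr_left
    intro q hq
    by_cases h : q.1 = k
    · have h2 : q.2 = q.1 := hv q hq
      obtain ⟨a, b⟩ := q
      simp only at h h2
      simp [h, h2]
    · simp [h]
  rw [this, List.map_id]

-- contains is invariant under a filter that keeps every entry with key k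
theorem pv_contains_filter (d1 d2 : PySem.Dict Int Int) (S : List Int)
    (h : d2.items = d1.items.filter (fun q => !decide (q.1 ∈ S))) (k : Int) (hk : k ∉ S) :
    d2.contains k = d1.contains k := by
  simp only [PySem.Dict.contains, h]
  rw [Bool.eq_iff_iff]
  simp only [List.any_eq_true, List.mem_filter]
  constructor
  · rintro ⟨q, ⟨hq, _⟩, hqk⟩; exact ⟨q, hq, hqk⟩
  · rintro ⟨q, hq, hqk⟩
    refine ⟨q, ⟨hq, ?_⟩, hqk⟩
    have : q.1 = k := by simpa using hqk
    simp [this, hk]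

-- CORE: pass 2 under the updated last-removal map equals pass 2 under the old one with
-- the keys of S suppressed, provided every key of S has last-removal index ≥ j + |l|
theorem pvAgree (l : List (Int × List Int)) (j : Int) (d1 d2 r r' : PySem.Dict Int Int)
    (S : List Int)
    (hout : ∀ k, k ∉ S → r'.getD k (-1) = r.getD k (-1))
    (hin : ∀ k, k ∈ S → j + (l.length : Int) ≤ r'.getD k (-1))
    (hd : d2.items = d1.items.filter (fun q => !decide (q.1 ∈ S))) :
    ((pvIFold (pvB_pass2 r') (j, d2) l).2).items
      = ((pvIFold (pvB_pass2 r) (j, d1) l).2).items.filter (fun q => !decide (q.1 ∈ S)) := by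
  induction l generalizing j d1 d2 with
  | nil => simpa [pvIFold] using hd
  | cons p t ih =>
      simp only [pvIFold, List.foldl_cons]
      have hstep : (pvB_pass2 r' j d2 p).items
          = (pvB_pass2 r j d1 p).items.filter (fun q => !decide (q.1 ∈ S)) := by
        by_cases hp : p.1 ∈ S
        · -- r' forbids inserting p.1; on the d1 side a possible insert is filtered away
          have hge : j + ((p :: t).length : Int) ≤ r'.getD p.1 (-1) := hin p.1 hp
          have hnlt : ¬ r'.getD p.1 (-1) < j := by
            simp only [List.length_cons] at hge; push_cast at hge; omega
          unfold pvB_pass2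
          rw [if_neg (by tauto)]
          split
          · next hc =>
            rw [PySem.Dict.items_insert_of_not_contains _ _ (by simpa using hc.2.2)]
            rw [List.filter_append]
            simp [hd, hp]
          · exact hd
        · -- outside S both sides take the same branch
          have hcc : d2.contains p.1 = d1.contains p.1 := pv_contains_filter d1 d2 S hd p.1 hp
          have hrr : r'.getD p.1 (-1) = r.getD p.1 (-1) := hout p.1 hp
          unfold pvB_pass2
          rw [hrr, hcc]
          split
          · next hc =>
            rw [PySem.Dict.items_insert_of_not_contains _ _
                (show d2.contains p.1 = false by rw [hcc]; simpa using hc.2.2),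
              PySem.Dict.items_insert_of_not_contains _ _
                (show d1.contains p.1 = false by simpa using hc.2.2)]
            rw [List.filter_append, hd]
            simp [hp]
          · exact hd
      have hin' : ∀ k, k ∈ S → (j + 1) + (t.length : Int) ≤ r'.getD k (-1) := by
        intro k hk
        have := hin k hk
        push_cast [List.length_cons] at this
        omega
      have := ih (j + 1) (pvB_pass2 r j d1 p) (pvB_pass2 r' j d2 p) hin' hstep
      simpa [pvIFold] using this

-- the main induction: A's dict equals B's pass-2 dict
theorem pvMain (l : List (Int × List Int)) :
    l.foldl pvA_step PySem.Dict.empty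
      = (pvIFold (pvB_pass2 ((pvIFold pvB_pass1 (0, PySem.Dict.empty) l).2))
          (0, PySem.Dict.empty) l).2 := by
  induction l using List.reverseRecOn with
  | nil => rfl
  | append_singleton l p ih =>
      have hw : ∀ k : Int, (PySem.Dict.empty : PySem.Dict Int Int).getD k (-1) < (0 : Int) := by
        intro k
        simp [PySem.Dict.getD_empty]
      have hfst1 : (pvIFold pvB_pass1 (0, PySem.Dict.empty) l).1 = (l.length : Int) := by
        rw [pvIFold_fst]; ring
      have hR' : (pvIFold pvB_pass1 (0, PySem.Dict.empty) (l ++ [p])).2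
          = pvB_pass1 (l.length : Int) ((pvIFold pvB_pass1 (0, PySem.Dict.empty) l).2) p := by
        rw [pvIFold_append, pvIFold_singleton, hfst1]
      rw [List.foldl_append, List.foldl_cons, List.foldl_nil]
      rw [pvIFold_append, hR', pvIFold_singleton]
      dsimp only
      by_cases hp : p.2 = []
      · -- empty overlaps: one conditional insert on both sides
        have hR'R : pvB_pass1 (l.length : Int) ((pvIFold pvB_pass1 (0, PySem.Dict.empty) l).2) p
            = (pvIFold pvB_pass1 (0, PySem.Dict.empty) l).2 := by
          rw [pvB_pass1, if_pos hp]
        rw [hR'R]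
        have hfstP : (pvIFold (pvB_pass2 ((pvIFold pvB_pass1 (0, PySem.Dict.empty) l).2))
            (0, PySem.Dict.empty) l).1 = (l.length : Int) := by
          rw [pvIFold_fst]; ring
        rw [hfstP, ← ih]
        have hlt : ((pvIFold pvB_pass1 (0, PySem.Dict.empty) l).2).getD p.1 (-1)
            < (l.length : Int) := by
          have := pvR_lt l (0, PySem.Dict.empty) (fun k => hw k) p.1
          simpa using this
        rw [pvA_step, if_pos hp, pvB_pass2]
        by_cases hcon : (l.foldl pvA_step PySem.Dict.empty).contains p.1 = true
        · rw [if_neg (by simp [hcon])]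
          exact pv_insert_self_of_contains _ p.1 hcon
            (pvA_vals l PySem.Dict.empty (by intro q hq; simp [PySem.Dict.empty] at hq))
        · rw [if_pos ⟨hp, hlt, by simpa using hcon⟩]
      · -- non-empty overlaps: A filters the removed keys, B never inserts them
        rw [pvB_pass2, if_neg (by simp [hp])]
        apply PySem.Dict.ext
        rw [pvA_step_items_ne _ p hp]
        have hgd : ∀ k, (pvB_pass1 (l.length : Int)
              ((pvIFold pvB_pass1 (0, PySem.Dict.empty) l).2) p).getD k (-1)
            = if k ∈ p.1 :: p.2 then (l.length : Int)
              else ((pvIFold pvB_pass1 (0, PySem.Dict.empty) l).2).getD k (-1) := by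
          intro k
          rw [pvB_pass1, if_neg hp, pv_getD_foldl_insert_const, PySem.Dict.getD_insert]
          by_cases h2 : k ∈ p.2 <;> by_cases h1 : k = p.1 <;> simp [h1, h2]
        have hout : ∀ k, k ∉ (p.1 :: p.2) →
            (pvB_pass1 (l.length : Int) ((pvIFold pvB_pass1 (0, PySem.Dict.empty) l).2) p).getD k (-1)
              = ((pvIFold pvB_pass1 (0, PySem.Dict.empty) l).2).getD k (-1) := by
          intro k hk; rw [hgd, if_neg hk]
        have hin : ∀ k, k ∈ (p.1 :: p.2) → (0 : Int) + (l.length : Int) ≤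
            (pvB_pass1 (l.length : Int) ((pvIFold pvB_pass1 (0, PySem.Dict.empty) l).2) p).getD k (-1) := by
          intro k hk; rw [hgd, if_pos hk]; omega
        have hag := pvAgree l 0 PySem.Dict.empty PySem.Dict.empty
          ((pvIFold pvB_pass1 (0, PySem.Dict.empty) l).2)
          (pvB_pass1 (l.length : Int) ((pvIFold pvB_pass1 (0, PySem.Dict.empty) l).2) p)
          (p.1 :: p.2) hout hin (by simp [PySem.Dict.empty])
        rw [hag, ← ih]

-- ===== VERDICT (by name: the statement is the Claim_ definition above) =====
theorem find_missing_overlap_spec : Claim_equal_find_missing_overlap := by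
  intro l _
  unfold Spec_find_missing_overlap find_missing_overlap find_missing_overlap_alt
  rw [pvMain]
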